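-- pv_equiv track=rewrite | github.com/hazananayurt/viref | extract_features.py | get_id_to_start_end
-- ===== SOURCE A (Python) =====
-- def get_id_to_start_end(bb_gt, minimum_frame_number, maximum_frame_number):
-- 	id_to_start_end = {}
-- 	for bb in bb_gt:
-- 		obj_id, frame_number, x, y, width, height = bb
-- 		if obj_id not in id_to_start_end:
-- 			id_to_start_end[obj_id] = [maximum_frame_number+1, -1] #start, end
-- 		if frame_number < id_to_start_end[obj_id][0]:
-- 			id_to_start_end[obj_id][0] = frame_number
-- 		if frame_number > id_to_start_end[obj_id][1]:
-- 			id_to_start_end[obj_id][1] = frame_number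
-- 	return id_to_start_end
-- ===== SOURCE B (Python) =====
-- def get_id_to_start_end(bb_gt, minimum_frame_number, maximum_frame_number):
-- 	groups = {}
-- 	for obj_id, frame_number, x, y, width, height in bb_gt:
-- 		groups[obj_id] = groups.get(obj_id, []) + [frame_number]
-- 	return {obj_id: [min([maximum_frame_number + 1] + frames),
-- 	                 max([-1] + frames)]
-- 	        for obj_id, frames in groups.items()}
-- ===== Notes on version B (the rewrite author's own statement) =====
-- stated objective: alternative
-- what changed: Replaced the single-pass incremental min/max dict of [start,end] lists by a two-phase decomposition: first group frame numbers per object id, then reduce each group with min/max folding the sentinels maximum_frame_number+1 and -1 into the reduction.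
import Mathlib
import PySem

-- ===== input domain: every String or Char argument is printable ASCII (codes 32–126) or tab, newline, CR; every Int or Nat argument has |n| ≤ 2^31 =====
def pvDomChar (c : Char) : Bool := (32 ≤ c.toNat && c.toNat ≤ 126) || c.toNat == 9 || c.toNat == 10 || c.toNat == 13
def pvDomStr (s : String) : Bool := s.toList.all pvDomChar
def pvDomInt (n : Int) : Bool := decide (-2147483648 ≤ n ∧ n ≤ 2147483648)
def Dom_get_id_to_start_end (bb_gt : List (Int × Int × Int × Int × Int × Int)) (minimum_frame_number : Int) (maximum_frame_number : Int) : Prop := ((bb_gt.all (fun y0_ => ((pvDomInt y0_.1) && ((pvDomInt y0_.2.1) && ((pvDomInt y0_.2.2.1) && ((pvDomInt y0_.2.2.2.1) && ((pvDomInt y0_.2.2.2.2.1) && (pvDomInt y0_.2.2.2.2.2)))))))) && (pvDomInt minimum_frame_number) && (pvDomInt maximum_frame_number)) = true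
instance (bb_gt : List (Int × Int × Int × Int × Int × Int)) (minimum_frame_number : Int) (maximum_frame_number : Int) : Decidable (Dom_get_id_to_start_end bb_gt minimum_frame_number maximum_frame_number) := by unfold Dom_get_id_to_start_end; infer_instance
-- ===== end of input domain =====

-- B replaces A's single-pass incremental min/max update by a two-phase group-then-reduce
-- decomposition (same cost; objective: alternative).


-- ===== PORT A =====
-- loop body of A; value lists always have length 2, so List.getD i 0 / List.set i
-- are exact for Python's v[0], v[1], v[0]=…, v[1]=…; the final insert at obj_id
-- (overwrite in place) is Python's in-place mutation of the stored list
def pvStepA (maximum_frame_number : Int) (d : PySem.Dict Int (List Int)) (bb : Int × Int × Int × Int × Int × Int) : PySem.Dict Int (List Int) :=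
  let obj_id := bb.1
  let frame_number := bb.2.1
  let d := if !(d.contains obj_id) then d.insert obj_id [maximum_frame_number + 1, -1] else d
  let v := d.getD obj_id []          -- key present here, so getD = Python's d[obj_id]
  let v := if frame_number < v.getD 0 0 then v.set 0 frame_number else v
  let v := if frame_number > v.getD 1 0 then v.set 1 frame_number else v
  d.insert obj_id v

def get_id_to_start_end (bb_gt : List (Int × Int × Int × Int × Int × Int)) (minimum_frame_number : Int) (maximum_frame_number : Int) : List (Int × List Int) :=
  (bb_gt.foldl (pvStepA maximum_frame_number) PySem.Dict.empty).items

-- ===== PORT B =====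
-- grouping pass of B: groups[obj_id] = groups.get(obj_id, []) + [frame_number]
def pvStepG (g : PySem.Dict Int (List Int)) (bb : Int × Int × Int × Int × Int × Int) : PySem.Dict Int (List Int) :=
  g.modify bb.1 [] (· ++ [bb.2.1])

-- the dict comprehension iterates groups.items() whose keys are distinct, so its
-- items are the map below; Python's min/max on the nonempty list [s]+fs is the
-- left fold of min/max started at s
def get_id_to_start_end_alt (bb_gt : List (Int × Int × Int × Int × Int × Int)) (minimum_frame_number : Int) (maximum_frame_number : Int) : List (Int × List Int) :=
  let groups := bb_gt.foldl pvStepG PySem.Dict.empty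
  groups.items.map (fun p => (p.1, [p.2.foldl min (maximum_frame_number + 1), p.2.foldl max (-1)]))

-- ===== PRECONDITION & SPEC =====
def Spec_get_id_to_start_end (bb_gt : List (Int × Int × Int × Int × Int × Int)) (minimum_frame_number : Int) (maximum_frame_number : Int) (out : List (Int × List Int)) : Prop := out = get_id_to_start_end_alt bb_gt minimum_frame_number maximum_frame_number
instance (bb_gt : List (Int × Int × Int × Int × Int × Int)) (minimum_frame_number : Int) (maximum_frame_number : Int) (out : List (Int × List Int)) : Decidable (Spec_get_id_to_start_end bb_gt minimum_frame_number maximum_frame_number out) := by unfold Spec_get_id_to_start_end; infer_instance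

-- ===== CLAIM (what is proved, stated in full; the proofs are below) =====
def Claim_equal_get_id_to_start_end : Prop := ∀ (bb_gt : List (Int × Int × Int × Int × Int × Int)) (minimum_frame_number : Int) (maximum_frame_number : Int), Dom_get_id_to_start_end bb_gt minimum_frame_number maximum_frame_number → Spec_get_id_to_start_end bb_gt minimum_frame_number maximum_frame_number (get_id_to_start_end bb_gt minimum_frame_number maximum_frame_number)

-- ===== LEMMAS AND PROOFS =====

-- B's reduction pass, applied to a grouping dict, as a dict
def pvRender (mx : Int) (g : PySem.Dict Int (List Int)) : PySem.Dict Int (List Int) :=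
  PySem.Dict.mk (g.items.map (fun p => (p.1, [p.2.foldl min (mx + 1), p.2.foldl max (-1)])))

lemma get?_pvRender (mx : Int) (g : PySem.Dict Int (List Int)) (k : Int) :
    (pvRender mx g).get? k = (g.get? k).map (fun fs => [fs.foldl min (mx + 1), fs.foldl max (-1)]) := by
  obtain ⟨l⟩ := g
  induction l with
  | nil => rfl
  | cons p t ih =>
    show (PySem.Dict.mk ((p.1, [p.2.foldl min (mx+1), p.2.foldl max (-1)]) :: t.map _)).get? k = _
    rw [PySem.Dict.get?_mk_cons, PySem.Dict.get?_mk_cons]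
    by_cases h : p.1 == k
    · simp [h]
    · simp only [h, Bool.false_eq_true, if_false]
      exact ih

lemma contains_pvRender (mx : Int) (g : PySem.Dict Int (List Int)) (k : Int) :
    (pvRender mx g).contains k = g.contains k := by
  rw [PySem.Dict.contains_eq_isSome_get?, PySem.Dict.contains_eq_isSome_get?, get?_pvRender]
  cases g.get? k <;> rfl

lemma pvStep_commute (mx : Int) (g : PySem.Dict Int (List Int)) (bb : Int × Int × Int × Int × Int × Int) :
    pvStepA mx (pvRender mx g) bb = pvRender mx (pvStepG g bb) := by
  obtain ⟨k, f, rest⟩ := bb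
  have hmod : pvStepG g (k, f, rest) = g.insert k (g.getD k [] ++ [f]) := rfl
  cases hget : g.get? k with
  | none =>
    have hc : g.contains k = false := by
      rw [PySem.Dict.contains_eq_isSome_get?, hget]; rfl
    have hcr : (pvRender mx g).contains k = false := by rw [contains_pvRender, hc]
    have hgd : g.getD k [] = [] := PySem.Dict.getD_of_get?_eq_none _ _ hget
    simp only [pvStepA, hmod, hgd, hcr, Bool.not_false, if_true,
      PySem.Dict.getD_insert_self, List.nil_append]
    simp only [List.getD]
    rw [PySem.Dict.insert_insert_self]
    apply PySem.Dict.ext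
    rw [PySem.Dict.items_insert_of_not_contains _ _ hcr]
    show _ = (PySem.Dict.mk ((g.insert k [f]).items.map _)).items
    rw [PySem.Dict.items_insert_of_not_contains _ _ hc]
    simp only [List.map_append, List.map_cons, List.map_nil, List.foldl_cons, List.foldl_nil]
    show (pvRender mx g).items ++ _ = (pvRender mx g).items ++ _
    apply congrArg
    split_ifs <;> simp_all <;> omega
  | some fs =>
    have hc : g.contains k = true := by
      rw [PySem.Dict.contains_eq_isSome_get?, hget]; rfl
    have hcr : (pvRender mx g).contains k = true := by rw [contains_pvRender, hc]
    have hgd : g.getD k [] = fs := by rw [PySem.Dict.getD_eq_get?_getD, hget]; rfl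
    have hgdr : (pvRender mx g).getD k [] = [fs.foldl min (mx + 1), fs.foldl max (-1)] := by
      rw [PySem.Dict.getD_eq_get?_getD, get?_pvRender, hget]; rfl
    simp only [pvStepA, hmod, hgd, hcr, Bool.not_true, Bool.false_eq_true, if_false, hgdr]
    apply PySem.Dict.ext
    rw [PySem.Dict.items_insert_of_contains _ _ hcr]
    show _ = (PySem.Dict.mk ((g.insert k (fs ++ [f])).items.map _)).items
    rw [PySem.Dict.items_insert_of_contains _ _ hc]
    show (g.items.map _).map _ = (g.items.map _).map _
    rw [List.map_map, List.map_map]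
    apply List.map_congr_left
    intro p _
    by_cases hp : p.1 == k
    · simp only [Function.comp, hp, if_true]
      refine congrArg (fun v => (k, v)) ?_
      rw [List.foldl_append, List.foldl_append]
      split_ifs <;> simp_all <;> omega
    · simp [Function.comp, hp]

lemma pvMain (mx : Int) (l : List (Int × Int × Int × Int × Int × Int)) (g : PySem.Dict Int (List Int)) :
    l.foldl (pvStepA mx) (pvRender mx g) = pvRender mx (l.foldl pvStepG g) := by
  induction l generalizing g with
  | nil => rfl
  | cons bb t ih =>
    rw [List.foldl_cons, List.foldl_cons, pvStep_commute]
    exact ih _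

-- ===== VERDICT (by name: the statement is the Claim_ definition above) =====
theorem get_id_to_start_end_spec : Claim_equal_get_id_to_start_end := by
  intro bb_gt mn mx _
  unfold Spec_get_id_to_start_end get_id_to_start_end get_id_to_start_end_alt
  have h0 : pvRender mx PySem.Dict.empty = PySem.Dict.empty := rfl
  have h := pvMain mx bb_gt PySem.Dict.empty
  rw [h0] at h
  rw [h]
  rfl
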